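-- pv_equiv track=rewrite | github.com/neilxdim/CodeJam | Practice/2014Round1A-B/FBT.py | countn
-- ===== SOURCE A (Python) =====
-- def countn(node, parent, elist):
--     max1 = max2 = 0
--     for child in elist[node]:
--         if child == parent: continue
--         n = countn(child, node, elist)
--         if n > max2:
--             if n > max1:
--                 max2 = max1
--                 max1 = n
--             else:
--                 max2 = n
--
--     return max1+max2+1 if max2 != 0 else 1
-- ===== SOURCE B (Python) =====
-- def countn(node, parent, elist):
--     vals = [countn(child, node, elist) for child in elist[node] if child != parent]
--     if len(vals) >= 2:
--         return sum(sorted(vals, reverse=True)[:2]) + 1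
--     return 1
-- ===== Notes on version B (the rewrite author's own statement) =====
-- stated objective: simpler
-- what changed: A threads an online two-maximum accumulator (max1, max2) through its child loop with nested comparison branches; B instead gathers all non-parent child counts into a list with a comprehension and returns 1 plus the sum of the two largest, obtained by reverse-sorting and slicing (the guards coincide because every recursive count is >= 1).
import Mathlib
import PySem

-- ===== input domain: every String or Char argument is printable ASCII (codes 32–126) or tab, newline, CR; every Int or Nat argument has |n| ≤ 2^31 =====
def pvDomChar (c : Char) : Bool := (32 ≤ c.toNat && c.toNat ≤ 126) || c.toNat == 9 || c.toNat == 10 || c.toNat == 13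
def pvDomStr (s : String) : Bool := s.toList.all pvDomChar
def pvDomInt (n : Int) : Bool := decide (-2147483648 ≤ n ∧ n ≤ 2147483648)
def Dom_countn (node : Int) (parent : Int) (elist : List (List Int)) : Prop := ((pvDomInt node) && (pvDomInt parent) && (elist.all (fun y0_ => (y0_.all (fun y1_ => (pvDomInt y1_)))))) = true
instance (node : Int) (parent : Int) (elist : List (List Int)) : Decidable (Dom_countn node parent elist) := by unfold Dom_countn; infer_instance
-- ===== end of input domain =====

-- B replaces A's online two-maximum tracking by gather-the-child-counts then sum the two
-- largest of a reverse-sorted list (objective: simpler decomposition; same asymptotic cost).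

-- ===== PORT A =====
-- Both recursions are total in Python only because the input encodes a forest; the fuel
-- argument (an upper bound on the recursion depth on Pre_ inputs: one more than the number
-- of distinct (vertex, predecessor) walk states, which is at most the total number of
-- adjacency entries + 1) only makes the SAME recursion total — it is never exhausted on
-- inputs satisfying Pre_countn.
def pvFuel (elist : List (List Int)) : Nat := (elist.map List.length).sum + 2

-- the body of A's 'if n > max2: …' update, on the pair (max1, max2)
def pvTwoMax (m : Int × Int) (n : Int) : Int × Int :=
  if n > m.2 then (if n > m.1 then (n, m.1) else (m.1, n)) else m

def countnFuelA (elist : List (List Int)) : Nat → Int → Int → Int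
  | 0, _, _ => 1
  | f+1, node, parent =>
    let row := (PySem.List.pyGet? elist node).getD []   -- elist[node]; none (IndexError) excluded by Pre_
    let mm := row.foldl
      (fun m child =>
        if child = parent then m
        else pvTwoMax m (countnFuelA elist f child node))
      ((0 : Int), (0 : Int))
    if mm.2 ≠ 0 then mm.1 + mm.2 + 1 else 1

def countn (node : Int) (parent : Int) (elist : List (List Int)) : Int :=
  countnFuelA elist (pvFuel elist) node parent

-- ===== PORT B =====
def countnFuelB (elist : List (List Int)) : Nat → Int → Int → Int
  | 0, _, _ => 1
  | f+1, node, parent =>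
    let vals := (((PySem.List.pyGet? elist node).getD []).filter
        (fun child => child ≠ parent)).map
        (fun child => countnFuelB elist f child node)
    if 2 ≤ vals.length then
      (PySem.List.slice (PySem.List.sorted vals (fun x => x) true) none (some 2)).sum + 1
    else 1

def countn_alt (node : Int) (parent : Int) (elist : List (List Int)) : Int :=
  countnFuelB elist (pvFuel elist) node parent

-- ===== PRECONDITION & SPEC =====
-- helpers for Pre_: the parent-skipping walk relation on (vertex, predecessor) states
def pvValid (n : Nat) (c : Int) : Bool := decide (-(n : Int) ≤ c ∧ c < (n : Int))
def pvSucc (elist : List (List Int)) (s : Int × Int) : List (Int × Int) :=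
  (((PySem.List.pyGet? elist s.1).getD []).filter (fun c => c ≠ s.2)).map (fun c => (c, s.1))
def pvGrow (elist : List (List Int)) (S : List (Int × Int)) : List (Int × Int) :=
  (S ++ S.flatMap (pvSucc elist)).dedup
def pvClosure (elist : List (List Int)) : Nat → List (Int × Int) → List (Int × Int)
  | 0, S => S
  | f+1, S => pvClosure elist f (pvGrow elist S)
def pvSafeIter (elist : List (List Int)) : Nat → List (Int × Int) → List (Int × Int)
  | 0, _ => []
  | f+1, S =>
    let T := pvSafeIter elist f S
    S.filter (fun s => pvValid elist.length s.1
      && (pvSucc elist s).all (fun t => T.contains t))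
-- Pre_countn = the natural domain of A, and exactly the inputs on which Python A returns
-- normally: every (vertex, predecessor) state reachable from (node, parent) under the
-- parent-skipping walk relation of elist lies in that relation's well-founded part (all
-- indices in range, no cycle) — i.e. elist encodes a forest walkable from node, as in the
-- Code Jam problem; outside Pre_ Python A raises IndexError or RecursionError.
def Pre_countn (node : Int) (parent : Int) (elist : List (List Int)) : Prop :=
  (let S := pvClosure elist ((elist.map List.length).sum + 2) [(node, parent)]
   (pvSafeIter elist (S.length + 1) S).contains (node, parent)) = true
instance (node : Int) (parent : Int) (elist : List (List Int)) : Decidable (Pre_countn node parent elist) := by unfold Pre_countn; infer_instance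
def pvWitness_countn : Int × Int × List (List Int) := (0, -1, [[1, 2], [0], [0]])

def Spec_countn (node : Int) (parent : Int) (elist : List (List Int)) (out : Int) : Prop := out = countn_alt node parent elist
instance (node : Int) (parent : Int) (elist : List (List Int)) (out : Int) : Decidable (Spec_countn node parent elist out) := by unfold Spec_countn; infer_instance

-- ===== CLAIM (what is proved, stated in full; the proofs are below) =====
def Claim_equal_countn : Prop := ∀ (node : Int) (parent : Int) (elist : List (List Int)), Dom_countn node parent elist → Pre_countn node parent elist → Spec_countn node parent elist (countn node parent elist)

-- ===== LEMMAS AND PROOFS =====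

-- B's result is always at least 1 (every subtree contributes one node)
lemma countnFuelB_ge_one (elist : List (List Int)) :
    ∀ (f : Nat) (node parent : Int), 1 ≤ countnFuelB elist f node parent := by
  intro f
  induction f with
  | zero => intro node parent; simp [countnFuelB]
  | succ f ih =>
    intro node parent
    simp only [countnFuelB]
    split
    · have hsum : 0 ≤ (PySem.List.slice
          (PySem.List.sorted ((((PySem.List.pyGet? elist node).getD []).filter
            (fun child => child ≠ parent)).map (fun child => countnFuelB elist f child node))
            (fun x => x) true) none (some 2)).sum := by
        apply List.sum_nonneg
        intro x hx
        rw [PySem.List.slice_to _ (by norm_num)] at hx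
        have hx' := List.mem_of_mem_take hx
        rw [PySem.List.mem_sorted] at hx'
        obtain ⟨c, _, rfl⟩ := List.mem_map.mp hx'
        exact le_trans (by norm_num) (ih c node)
      omega
    · omega

-- A's two-max update on the first two entries of a descending sorted list = inserting into it
lemma twoMax_insert (s : List Int) (x : Int)
    (hs : s.Pairwise (fun a b => b ≤ a)) (h1 : ∀ v ∈ s, 1 ≤ v) (hx : 1 ≤ x) :
    pvTwoMax (s.headD 0, (s.drop 1).headD 0) x
      = ((PySem.List.insertBy (fun a b => decide (b < a)) x s).headD 0,
         ((PySem.List.insertBy (fun a b => decide (b < a)) x s).drop 1).headD 0) := by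
  have hx0 : (0 : Int) < x := by omega
  match s with
  | [] =>
    simp [pvTwoMax, PySem.List.insertBy, hx0]
  | [a] =>
    have ha := h1 a (by simp)
    by_cases h : a < x
    · simp [pvTwoMax, PySem.List.insertBy, h, hx0]
    · simp [pvTwoMax, PySem.List.insertBy, h, hx0]
  | a :: b :: t =>
    have hab : b ≤ a := (List.pairwise_cons.mp hs).1 b (by simp)
    by_cases h : a < x
    · simp [pvTwoMax, PySem.List.insertBy, h, show b < x by omega]
    · by_cases h' : b < x
      · simp [pvTwoMax, PySem.List.insertBy, h, h']
      · simp [pvTwoMax, PySem.List.insertBy, h, h']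

-- folding A's two-max over l starting after a sorted prefix = first two entries of the sort of pre ++ l
lemma foldl_twoMax_aux :
    ∀ (l pre : List Int), (∀ v ∈ l, 1 ≤ v) → (∀ v ∈ pre, 1 ≤ v) →
    l.foldl pvTwoMax
        ((PySem.List.sorted pre (fun x => x) true).headD 0,
         ((PySem.List.sorted pre (fun x => x) true).drop 1).headD 0)
      = ((PySem.List.sorted (pre ++ l) (fun x => x) true).headD 0,
         ((PySem.List.sorted (pre ++ l) (fun x => x) true).drop 1).headD 0) := by
  intro l
  induction l with
  | nil => intro pre _ _; simp
  | cons x l ih =>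
    intro pre hl hpre
    have hins : PySem.List.insertBy (fun a b => decide (b < a)) x
        (PySem.List.sorted pre (fun x => x) true)
        = PySem.List.sorted (pre ++ [x]) (fun x => x) true := by
      rw [PySem.List.sorted_rev_eq_foldl_insertBy pre, PySem.List.sorted_rev_eq_foldl_insertBy (pre ++ [x]),
          List.foldl_append]
      simp
    have hstep : pvTwoMax
        ((PySem.List.sorted pre (fun x => x) true).headD 0,
         ((PySem.List.sorted pre (fun x => x) true).drop 1).headD 0) x
        = ((PySem.List.sorted (pre ++ [x]) (fun x => x) true).headD 0,
           ((PySem.List.sorted (pre ++ [x]) (fun x => x) true).drop 1).headD 0) := by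
      rw [← hins]
      exact twoMax_insert _ x (PySem.List.sorted_pairwise_rev pre (fun x => x))
        (fun v hv => hpre v ((PySem.List.mem_sorted pre _ true v).mp hv))
        (hl x (by simp))
    have h1 : ∀ v ∈ l, 1 ≤ v := fun v hv => hl v (by simp [hv])
    have h2 : ∀ v ∈ pre ++ [x], 1 ≤ v := by
      intro v hv
      rcases List.mem_append.mp hv with h | h
      · exact hpre v h
      · simp at h; subst h; exact hl v (by simp)
    calc (x :: l).foldl pvTwoMax _
        = l.foldl pvTwoMax ((PySem.List.sorted (pre ++ [x]) (fun x => x) true).headD 0,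
            ((PySem.List.sorted (pre ++ [x]) (fun x => x) true).drop 1).headD 0) := by
          rw [List.foldl_cons, hstep]
      _ = _ := by rw [ih (pre ++ [x]) h1 h2]; simp

lemma foldl_twoMax_sorted (l : List Int) (h1 : ∀ v ∈ l, 1 ≤ v) :
    l.foldl pvTwoMax ((0 : Int), (0 : Int))
      = ((PySem.List.sorted l (fun x => x) true).headD 0,
         ((PySem.List.sorted l (fun x => x) true).drop 1).headD 0) := by
  have := foldl_twoMax_aux l [] h1 (by simp)
  simpa using this

-- the two ports agree at every fuel
lemma fuel_eq (elist : List (List Int)) :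
    ∀ (f : Nat) (node parent : Int),
      countnFuelA elist f node parent = countnFuelB elist f node parent := by
  intro f
  induction f with
  | zero => intro node parent; rfl
  | succ f ih =>
    intro node parent
    simp only [countnFuelA, countnFuelB]
    set row := (PySem.List.pyGet? elist node).getD [] with hrow
    set vals := (row.filter (fun child => child ≠ parent)).map
        (fun child => countnFuelB elist f child node) with hvals
    have hbody : (fun (m : Int × Int) child =>
          if child = parent then m else pvTwoMax m (countnFuelA elist f child node))
        = (fun (m : Int × Int) child =>
          if (decide (child ≠ parent)) = true then pvTwoMax m (countnFuelB elist f child node) else m) := by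
      funext m c
      by_cases h : c = parent <;> simp [h, ih]
    have hfold : row.foldl
        (fun m child => if child = parent then m
          else pvTwoMax m (countnFuelA elist f child node)) ((0 : Int), (0 : Int))
        = vals.foldl pvTwoMax ((0 : Int), (0 : Int)) := by
      rw [hbody, hvals, List.foldl_map]
      exact List.foldl_filter.symm
    rw [hfold]
    have hge : ∀ v ∈ vals, 1 ≤ v := by
      intro v hv
      obtain ⟨c, _, rfl⟩ := List.mem_map.mp hv
      exact countnFuelB_ge_one elist f c node
    rw [foldl_twoMax_sorted vals hge]
    rw [PySem.List.slice_to _ (by norm_num)]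
    have hlen : (PySem.List.sorted vals (fun x => x) true).length = vals.length :=
      PySem.List.length_sorted vals _ true
    match hmatch : PySem.List.sorted vals (fun x => x) true with
    | [] =>
      have h0 : vals.length = 0 := by rw [← hlen, hmatch]; rfl
      simp [h0]
    | [a] =>
      have h0 : vals.length = 1 := by rw [← hlen, hmatch]; rfl
      simp [h0]
    | a :: b :: t =>
      have hlv : 2 ≤ vals.length := by rw [← hlen, hmatch]; simp
      have hb : 1 ≤ b := hge b ((PySem.List.mem_sorted vals _ true b).mp (by rw [hmatch]; simp))
      simp [hlv, show b ≠ 0 by omega]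

-- ===== VERDICT (by name: the statement is the Claim_ definition above) =====
theorem countn_spec : Claim_equal_countn := by
  intro node parent elist _ _
  show countn node parent elist = countn_alt node parent elist
  exact fuel_eq elist (pvFuel elist) node parent
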